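-- pv_equiv track=rewrite | github.com/DevOpsVL1/pdf-form-filler | form_fillers/cif1_base.py | fill_phone_boxes
-- ===== SOURCE A (Python) =====
-- def fill_phone_boxes(text, start_x, start_y, box_width=15, box_spacing=2,
--                      space_separator_width=7, space_after_position=3, add_leading_space=False):
--     """
--     Fill phone number boxes where space separator can have different width than character boxes
--
--     Args:
--         text: Phone number string (without spaces, e.g., "0321234567")
--         start_x: Starting X coordinate
--         start_y: Starting Y coordinate
--         box_width: Width of regular character boxes
--         box_spacing: Spacing between boxes
--         space_separator_width: Width of the empty space box (for the separator)
--         space_after_position: Position after which to add space (2 or 3)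
--         add_leading_space: If True, add leading space (start from 2nd box)
--
--     Returns:
--         List of tuples (char, x_pos, y_pos) - space returns empty string ''
--     """
--     positions = []
--     current_x = start_x
--
--     text = text.strip()
--
--     # Add leading space if requested
--     if add_leading_space:
--         positions.append(('', current_x, start_y))
--         current_x += box_width + box_spacing
--
--     # Process each character
--     for i, char in enumerate(text):
--         x_pos = current_x
--         y_pos = start_y
--
--         positions.append((char, x_pos, y_pos))
--         current_x += box_width + box_spacing
--
--         # Add space separator after specified position
--         if (i + 1) == space_after_position and (i + 1) < len(text):
--             positions.append(('', current_x, y_pos))  # Empty space box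
--             current_x += space_separator_width + box_spacing
--
--     return positions
-- ===== SOURCE B (Python) =====
-- def fill_phone_boxes(text, start_x, start_y, box_width=15, box_spacing=2,
--                      space_separator_width=7, space_after_position=3, add_leading_space=False):
--     # Closed-form index arithmetic: each box's x is computed directly from its
--     # index instead of threading an accumulator through the loop.
--     t = text.strip()
--     n = len(t)
--     step = box_width + box_spacing
--     lead = 1 if add_leading_space else 0
--     head = [('', start_x, start_y)] if add_leading_space else []
--     if 1 <= space_after_position < n:
--         p = space_after_position
--         first = [(t[j], start_x + (lead + j) * step, start_y) for j in range(p)]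
--         sep = [('', start_x + (lead + p) * step, start_y)]
--         rest = [(t[j], start_x + (lead + j) * step + space_separator_width + box_spacing, start_y)
--                 for j in range(p, n)]
--         return head + first + sep + rest
--     return head + [(t[j], start_x + (lead + j) * step, start_y) for j in range(n)]
-- ===== Notes on version B (the rewrite author's own statement) =====
-- stated objective: alternative
-- what changed: Replaced the accumulator loop (current_x threaded through appends with an inline separator branch) by closed-form index arithmetic: the x of every box is computed directly from its index, the separator case emits three precomputed list segments concatenated.
import Mathlib
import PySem

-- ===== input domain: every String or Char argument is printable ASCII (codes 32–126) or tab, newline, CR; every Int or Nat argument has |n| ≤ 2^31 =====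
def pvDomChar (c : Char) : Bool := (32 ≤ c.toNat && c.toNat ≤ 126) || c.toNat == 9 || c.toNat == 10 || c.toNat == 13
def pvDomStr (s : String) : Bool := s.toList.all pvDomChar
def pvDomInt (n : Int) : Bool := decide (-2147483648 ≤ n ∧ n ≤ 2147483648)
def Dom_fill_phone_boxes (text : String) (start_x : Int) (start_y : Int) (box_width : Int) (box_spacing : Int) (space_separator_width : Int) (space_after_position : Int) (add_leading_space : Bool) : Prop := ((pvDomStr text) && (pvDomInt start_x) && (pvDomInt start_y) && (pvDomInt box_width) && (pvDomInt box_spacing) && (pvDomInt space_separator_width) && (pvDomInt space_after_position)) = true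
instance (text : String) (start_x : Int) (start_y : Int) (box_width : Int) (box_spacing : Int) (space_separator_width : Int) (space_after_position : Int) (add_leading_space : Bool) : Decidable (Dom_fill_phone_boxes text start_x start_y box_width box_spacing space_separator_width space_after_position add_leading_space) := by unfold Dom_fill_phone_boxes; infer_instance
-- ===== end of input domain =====

-- ===== PORT A =====
-- B computes each box's x by closed-form index arithmetic instead of A's running accumulator; return values proved equal (no side effects involved).
def fillLoopA (y step sepAdv p : Int) (n : Nat) : List Char → Nat → Int → List (String × Int × Int)
  | [], _, _ => []
  | c :: rest, i, x =>
    if ((i : Int) + 1) = p ∧ ((i : Int) + 1) < (n : Int) then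
      (String.mk [c], x, y) :: ("", x + step, y) ::
        fillLoopA y step sepAdv p n rest (i + 1) (x + step + sepAdv)
    else
      (String.mk [c], x, y) :: fillLoopA y step sepAdv p n rest (i + 1) (x + step)

def fill_phone_boxes (text : String) (start_x : Int) (start_y : Int) (box_width : Int) (box_spacing : Int) (space_separator_width : Int) (space_after_position : Int) (add_leading_space : Bool) : List (String × Int × Int) :=
  let cs := (PySem.Str.strip text).toList
  let head : List (String × Int × Int) := if add_leading_space then [("", start_x, start_y)] else []
  let x0 : Int := if add_leading_space then start_x + box_width + box_spacing else start_x
  head ++ fillLoopA start_y (box_width + box_spacing) (space_separator_width + box_spacing)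
      space_after_position cs.length cs 0 x0

-- ===== PORT B =====
def fill_phone_boxes_alt (text : String) (start_x : Int) (start_y : Int) (box_width : Int) (box_spacing : Int) (space_separator_width : Int) (space_after_position : Int) (add_leading_space : Bool) : List (String × Int × Int) :=
  let cs := (PySem.Str.strip text).toList
  let n := cs.length
  let step := box_width + box_spacing
  let lead : Int := if add_leading_space then 1 else 0
  let head : List (String × Int × Int) := if add_leading_space then [("", start_x, start_y)] else []
  if 1 ≤ space_after_position ∧ space_after_position < (n : Int) then
    let p := space_after_position.toNat
    head ++ ((List.range p).map (fun j => (String.mk [cs.getD j ' '], start_x + (lead + (j : Int)) * step, start_y)))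
      ++ [("", start_x + (lead + (p : Int)) * step, start_y)]
      ++ ((List.range' p (n - p)).map (fun j => (String.mk [cs.getD j ' '], start_x + (lead + (j : Int)) * step + space_separator_width + box_spacing, start_y)))
  else
    head ++ ((List.range n).map (fun j => (String.mk [cs.getD j ' '], start_x + (lead + (j : Int)) * step, start_y)))

-- ===== PRECONDITION & SPEC =====
def Spec_fill_phone_boxes (text : String) (start_x : Int) (start_y : Int) (box_width : Int) (box_spacing : Int) (space_separator_width : Int) (space_after_position : Int) (add_leading_space : Bool) (out : List (String × Int × Int)) : Prop := out = fill_phone_boxes_alt text start_x start_y box_width box_spacing space_separator_width space_after_position add_leading_space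
instance (text : String) (start_x : Int) (start_y : Int) (box_width : Int) (box_spacing : Int) (space_separator_width : Int) (space_after_position : Int) (add_leading_space : Bool) (out : List (String × Int × Int)) : Decidable (Spec_fill_phone_boxes text start_x start_y box_width box_spacing space_separator_width space_after_position add_leading_space out) := by unfold Spec_fill_phone_boxes; infer_instance

-- ===== CLAIM (what is proved, stated in full; the proofs are below) =====
def Claim_equal_fill_phone_boxes : Prop := ∀ (text : String) (start_x : Int) (start_y : Int) (box_width : Int) (box_spacing : Int) (space_separator_width : Int) (space_after_position : Int) (add_leading_space : Bool), Dom_fill_phone_boxes text start_x start_y box_width box_spacing space_separator_width space_after_position add_leading_space → Spec_fill_phone_boxes text start_x start_y box_width box_spacing space_separator_width space_after_position add_leading_space (fill_phone_boxes text start_x start_y box_width box_spacing space_separator_width space_after_position add_leading_space)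

-- ===== LEMMAS AND PROOFS =====

-- A straight run of character boxes starting at x (the loop with the separator branch never firing).
def specLine (y step : Int) : List Char → Int → List (String × Int × Int)
  | [], _ => []
  | c :: rest, x => (String.mk [c], x, y) :: specLine y step rest (x + step)

theorem specLine_eq_map (y step : Int) : ∀ (cs : List Char) (x : Int),
    specLine y step cs x
      = (List.range cs.length).map (fun j => (String.mk [cs.getD j ' '], x + (j : Int) * step, y)) := by
  intro cs
  induction cs with
  | nil => intro x; simp [specLine]
  | cons c rest ih =>
    intro x
    simp only [specLine, List.length_cons, List.range_succ_eq_map, List.map_cons, List.map_map]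
    congr 1
    · simp
    · rw [ih (x + step)]
      apply List.map_congr_left
      intro j _
      simp only [Function.comp, List.getD_cons_succ, Prod.mk.injEq]
      exact ⟨by trivial, by push_cast; ring, by trivial⟩

theorem loopA_noFire (y step sepAdv p : Int) (n : Nat) : ∀ (cs : List Char) (i : Nat) (x : Int),
    (p ≤ (i : Int) ∨ (n : Int) ≤ p) →
    fillLoopA y step sepAdv p n cs i x = specLine y step cs x := by
  intro cs
  induction cs with
  | nil => intro i x _; simp [fillLoopA, specLine]
  | cons c rest ih =>
    intro i x h
    rw [fillLoopA, if_neg (by omega), specLine]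
    rw [ih (i + 1) (x + step) (by push_cast; omega)]

theorem loopA_fire (y step sepAdv p : Int) (n : Nat) (h1 : 1 ≤ p) (h2 : p < (n : Int)) :
    ∀ (cs : List Char) (i : Nat) (x : Int), (i : Int) + cs.length = (n : Int) → (i : Int) < p →
    fillLoopA y step sepAdv p n cs i x
      = specLine y step (cs.take (p.toNat - i)) x
        ++ ("", x + ((p.toNat - i : Nat) : Int) * step, y)
          :: specLine y step (cs.drop (p.toNat - i)) (x + ((p.toNat - i : Nat) : Int) * step + sepAdv) := by
  intro cs
  induction cs with
  | nil => intro i x hlen hip; simp at hlen; omega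
  | cons c rest ih =>
    intro i x hlen hip
    simp only [List.length_cons] at hlen
    by_cases hfire : ((i : Int) + 1) = p
    · have hk : p.toNat - i = 1 := by omega
      rw [fillLoopA, if_pos ⟨hfire, by omega⟩, hk]
      rw [loopA_noFire y step sepAdv p n rest (i + 1) (x + step + sepAdv) (by push_cast; omega)]
      simp [specLine]
    · have hk : 1 < p.toNat - i := by omega
      rw [fillLoopA, if_neg (by push_cast; omega)]
      rw [ih (i + 1) (x + step) (by push_cast; omega) (by omega)]
      have hsplit : p.toNat - i = (p.toNat - (i + 1)) + 1 := by omega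
      rw [hsplit]
      simp only [List.take_succ_cons, List.drop_succ_cons, specLine, List.cons_append]
      have e1 : x + step + ((p.toNat - (i + 1) : Nat) : Int) * step
          = x + ((p.toNat - (i + 1) + 1 : Nat) : Int) * step := by push_cast; ring
      rw [e1]

theorem getD_take_of_lt (cs : List Char) (k j : Nat) (h : j < k) :
    (cs.take k).getD j ' ' = cs.getD j ' ' := by
  simp [List.getD, h]

theorem getD_drop (cs : List Char) (k j : Nat) :
    (cs.drop k).getD j ' ' = cs.getD (k + j) ' ' := by
  simp [List.getD, List.getElem?_drop]

-- Core equality on the character list, with the leading-box offset abstracted as lead.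
theorem fill_core (cs : List Char) (start_x start_y box_width box_spacing space_separator_width space_after_position : Int) (lead x0 : Int) (hx0 : x0 = start_x + lead * (box_width + box_spacing)) :
    fillLoopA start_y (box_width + box_spacing) (space_separator_width + box_spacing)
        space_after_position cs.length cs 0 x0
      = if 1 ≤ space_after_position ∧ space_after_position < (cs.length : Int) then
          ((List.range space_after_position.toNat).map (fun j => (String.mk [cs.getD j ' '], start_x + (lead + (j : Int)) * (box_width + box_spacing), start_y)))
            ++ ("", start_x + (lead + (space_after_position.toNat : Int)) * (box_width + box_spacing), start_y)
              :: ((List.range' space_after_position.toNat (cs.length - space_after_position.toNat)).map (fun j => (String.mk [cs.getD j ' '], start_x + (lead + (j : Int)) * (box_width + box_spacing) + space_separator_width + box_spacing, start_y)))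
        else
          (List.range cs.length).map (fun j => (String.mk [cs.getD j ' '], start_x + (lead + (j : Int)) * (box_width + box_spacing), start_y)) := by
  by_cases hcond : 1 ≤ space_after_position ∧ space_after_position < (cs.length : Int)
  · rw [if_pos hcond]
    set p := space_after_position.toNat with hp
    have hpn : p ≤ cs.length := by omega
    rw [loopA_fire start_y (box_width + box_spacing) (space_separator_width + box_spacing)
        space_after_position cs.length hcond.1 hcond.2 cs 0 x0 (by push_cast; omega) (by omega)]
    simp only [Nat.sub_zero]
    congr 1
    · rw [specLine_eq_map, List.length_take, Nat.min_eq_left hpn]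
      apply List.map_congr_left
      intro j hj
      rw [List.mem_range] at hj
      rw [getD_take_of_lt cs p j hj, hx0]
      simp only [Prod.mk.injEq]
      exact ⟨by trivial, by ring, by trivial⟩
    · congr 1
      · simp only [Prod.mk.injEq]
        exact ⟨by trivial, by rw [hx0]; ring, by trivial⟩
      · rw [specLine_eq_map, List.length_drop]
        have hr : List.range' p (cs.length - p) = (List.range (cs.length - p)).map (fun j => p + j) := by
          rw [List.range'_eq_map_range]
        rw [hr, List.map_map]
        apply List.map_congr_left
        intro j hj
        simp only [Function.comp]
        rw [getD_drop cs p j, hx0]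
        simp only [Prod.mk.injEq]
        exact ⟨by trivial, by push_cast; ring, by trivial⟩
  · rw [if_neg hcond]
    rw [loopA_noFire start_y (box_width + box_spacing) (space_separator_width + box_spacing)
        space_after_position cs.length cs 0 x0 (by push_cast at hcond ⊢; omega)]
    rw [specLine_eq_map]
    apply List.map_congr_left
    intro j _
    rw [hx0]
    simp only [Prod.mk.injEq]
    exact ⟨by trivial, by ring, by trivial⟩

-- ===== VERDICT (by name: the statement is the Claim_ definition above) =====
set_option maxHeartbeats 1000000 in
theorem fill_phone_boxes_spec : Claim_equal_fill_phone_boxes := by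
  intro text start_x start_y box_width box_spacing space_separator_width space_after_position add_leading_space _
  unfold Spec_fill_phone_boxes fill_phone_boxes fill_phone_boxes_alt
  cases add_leading_space
  · simp only [Bool.false_eq_true, if_false, List.nil_append]
    rw [fill_core ((PySem.Str.strip text).toList) start_x start_y box_width box_spacing
        space_separator_width space_after_position 0 start_x (by ring)]
    split <;> simp only [List.append_assoc, List.singleton_append, List.cons_append, List.nil_append]
  · simp only [if_true, List.singleton_append]
    rw [fill_core ((PySem.Str.strip text).toList) start_x start_y box_width box_spacing
        space_separator_width space_after_position 1 (start_x + box_width + box_spacing) (by ring)]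
    split <;> simp only [List.append_assoc, List.singleton_append, List.cons_append, List.nil_append]
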